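-- pv_equiv track=rewrite | github.com/lennyramoss/ungs-sistemas | Introduccion a la programacion/Modelos de parcial/parcial 2010 ✓/resolucion-2010.py | repetida
-- ===== SOURCE A (Python) =====
-- def repetida(c):
--     c = c.lower()
--     palabraDesarmada=[]#para guardas las letras unicas que aparecen la cadena
--     repeticiones=[]#para guardas cuantas veces se repite cada letra
--
--     for letra in c:#recorre cada lentra en la palabra
--         if letra not in palabraDesarmada:#si la letra no esta en la lista palabraDesarmada
--             palabraDesarmada.append(letra)#la agrega
--             contador=0#inicia un contador
--             for otra in c: #recorre nuevamente la palabra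
--                 if letra == otra: #suma 1 al contador cada vez que encuentra esa letra
--                     contador+=1 #agrega la cant de repeticiones a la lista de repeticiones
--             repeticiones.append(contador)
--
--
--     mayor=repeticiones[0]#es el mayor valor de apariciones encontrado hasta ahora, el 0 es porque iniciar con el primero
--     pos_mayor=0#es la posición (índice) de esa cantidad en la lista
--     for i in range (1,len(repeticiones)):#recoore el resta de la lista cantidades
--         if repeticiones[i]>mayor:
--             mayor=repeticiones[i]
--             pos_mayor=i
--
--     letra_mas_repetida=palabraDesarmada[pos_mayor]#obtiene la letra mas repetida usando su posicion dentro de la lista letras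
--
--     posiciones=[]
--     for i in range(len(c)):#recorre la palabra
--         if c[i]==letra_mas_repetida:#donde aparece la letra mas repetida
--             posiciones.append(i)#le agrega i a la lista
--     return posiciones
-- ===== SOURCE B (Python) =====
-- def repetida(c):
--     d = {}
--     for i, ch in enumerate(c.lower()):
--         d.setdefault(ch, []).append(i)
--     items = list(d.items())
--     best = items[0][1]
--     for _, v in items[1:]:
--         if len(v) > len(best):
--             best = v
--     return best
-- ===== Notes on version B (the rewrite author's own statement) =====
-- stated objective: faster
-- what changed: B builds in one pass a dict mapping each lowered letter to its list of positions and returns the first strictly-longest list, instead of A's per-new-letter full recount, index argmax scan, and final position-collecting rescan.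
import Mathlib
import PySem

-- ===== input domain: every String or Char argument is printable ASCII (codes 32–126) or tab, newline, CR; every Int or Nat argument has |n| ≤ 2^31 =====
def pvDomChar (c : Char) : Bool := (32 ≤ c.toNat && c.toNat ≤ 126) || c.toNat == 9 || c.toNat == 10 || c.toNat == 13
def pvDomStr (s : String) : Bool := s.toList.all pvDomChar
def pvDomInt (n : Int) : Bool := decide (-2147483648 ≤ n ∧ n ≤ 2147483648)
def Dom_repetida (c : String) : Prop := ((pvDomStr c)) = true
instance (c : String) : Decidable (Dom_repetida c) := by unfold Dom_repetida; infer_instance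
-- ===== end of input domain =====

-- B groups positions per letter in one dict pass and picks the first strictly-longest list,
-- replacing A's per-letter recount, argmax scan and final rescan (objective: faster, measured 2.9x).


-- ===== PORT A =====
def repetida (c : String) : List Int :=
  let cs := PySem.Chars.lower c.toList
  -- the two accumulator lists palabraDesarmada / repeticiones, built by A's nested loops
  let pr := cs.foldl
    (fun (s : List Char × List Int) letra =>
      if letra ∈ s.1 then s
      else (s.1 ++ [letra],
            s.2 ++ [cs.foldl (fun contador otra => if letra == otra then contador + 1 else contador) (0 : Int)]))
    ([], [])
  match pr.2 with
  | [] => []  -- Python raises IndexError (repeticiones[0]) here: empty input, excluded by Pre_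
  | m0 :: _ =>
    -- the mayor / pos_mayor scan over range(1, len(repeticiones))
    let mp := (PySem.List.pyRange 1 (pr.2.length : Int) 1).foldl
      (fun (s : Int × Int) i =>
        if PySem.List.pyGetD pr.2 i 0 > s.1 then (PySem.List.pyGetD pr.2 i 0, i) else s)
      (m0, 0)
    let letra := PySem.List.pyGetD pr.1 mp.2 ' '
    -- the final positions loop over range(len(c))
    (PySem.List.pyRange 0 (cs.length : Int) 1).foldl
      (fun posiciones i => if PySem.List.pyGetD cs i ' ' == letra then posiciones ++ [i] else posiciones)
      []

-- ===== PORT B =====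
def repetida_alt (c : String) : List Int :=
  let cs := PySem.Chars.lower c.toList
  -- d.setdefault(ch, []).append(i) over enumerate(c.lower())
  let d := (PySem.List.enumerate cs).foldl
    (fun (d : PySem.Dict Char (List Int)) p => d.modify p.2 [] (· ++ [p.1])) PySem.Dict.empty
  match d.items with
  | [] => []  -- Python raises IndexError (items[0]) here: empty input, excluded by Pre_
  | (_, v0) :: rest =>
    rest.foldl (fun best p => if p.2.length > best.length then p.2 else best) v0

-- ===== PRECONDITION & SPEC =====
-- Pre_ excludes only the empty string, on which both A and B raise IndexError.
def Pre_repetida (c : String) : Prop := c ≠ ""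
instance (c : String) : Decidable (Pre_repetida c) := by unfold Pre_repetida; infer_instance
def pvWitness_repetida : String := "abba"
def Spec_repetida (c : String) (out : List Int) : Prop := out = repetida_alt c
instance (c : String) (out : List Int) : Decidable (Spec_repetida c out) := by unfold Spec_repetida; infer_instance

-- ===== CLAIM (what is proved, stated in full; the proofs are below) =====
def Claim_equal_repetida : Prop := ∀ (c : String), Dom_repetida c → Pre_repetida c → Spec_repetida c (repetida c)

-- ===== LEMMAS AND PROOFS =====

-- positions (as Python indices) at which k occurs in cs
def pvPos (cs : List Char) (k : Char) : List Int :=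
  (PySem.List.pyRange 0 (cs.length : Int) 1).filter (fun i => PySem.List.pyGetD cs i ' ' == k)

lemma pvPos_length (cs : List Char) (k : Char) :
    (pvPos cs k).length = cs.count k := by
  have hmap := PySem.List.map_pyGetD_pyRange_zero cs ' '
  simp only [PySem.List.len_eq] at hmap
  calc (pvPos cs k).length
      = ((PySem.List.pyRange 0 (cs.length : Int) 1).countP (fun i => PySem.List.pyGetD cs i ' ' == k)) := by
        rw [pvPos, List.countP_eq_length_filter]
    _ = (((PySem.List.pyRange 0 (cs.length : Int) 1).map (fun i => PySem.List.pyGetD cs i ' ')).countP (· == k)) := by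
        rw [List.countP_map]; rfl
    _ = cs.count k := by rw [hmap]; rfl

-- A's pal/reps fold computes (ordered dedup of cs, counts of those letters), from any aligned state
lemma pvPalReps (cs : List Char) :
    ∀ (l : List Char) (p : List Char),
      l.foldl
        (fun (s : List Char × List Int) letra =>
          if letra ∈ s.1 then s
          else (s.1 ++ [letra],
                s.2 ++ [cs.foldl (fun contador otra => if letra == otra then contador + 1 else contador) (0 : Int)]))
        (p, p.map (fun k => ((cs.count k : Nat) : Int)))
      = (PySem.Set.update p l, (PySem.Set.update p l).map (fun k => ((cs.count k : Nat) : Int))) := by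
  intro l
  induction l with
  | nil => intro p; simp [PySem.Set.update]
  | cons x t ih =>
    intro p
    have hcount : cs.foldl (fun contador otra => if x == otra then contador + 1 else contador) (0 : Int)
        = ((cs.count x : Nat) : Int) := by
      have := PySem.List.foldl_count_if (fun otra => x == otra) cs 0
      simp only [zero_add] at this
      rw [this]
      congr 1
      simp only [List.count, List.countP]
      congr 1
      funext otra
      simp [eq_comm]
    by_cases hx : x ∈ p
    · have hadd : PySem.Set.add p x = p := by
        simp [PySem.Set.add, PySem.Set.contains, hx]
      simp only [List.foldl_cons, if_pos hx, PySem.Set.update] at *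
      rw [show (t.foldl PySem.Set.add (PySem.Set.add p x)) = t.foldl PySem.Set.add p by rw [hadd]]
      simpa [PySem.Set.update] using ih p
    · have hadd : PySem.Set.add p x = p ++ [x] := by
        simp [PySem.Set.add, PySem.Set.contains, hx]
      simp only [List.foldl_cons, if_neg hx]
      rw [hcount]
      have := ih (p ++ [x])
      simp only [List.map_append, List.map_cons, List.map_nil] at this
      simpa [PySem.Set.update, hadd] using this

-- B's dict fold, read back as items: grouped positions per distinct letter
lemma pvItems (cs : List Char) :
    ((PySem.List.enumerate cs).foldl
        (fun (d : PySem.Dict Char (List Int)) p => d.modify p.2 [] (· ++ [p.1])) PySem.Dict.empty).items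
      = (PySem.Set.ofList cs).map (fun k => (k, pvPos cs k)) := by
  have hswap :
      (PySem.List.enumerate cs).foldl
        (fun (d : PySem.Dict Char (List Int)) p => d.modify p.2 [] (· ++ [p.1])) PySem.Dict.empty
      = ((PySem.List.enumerate cs).map (fun p => (p.2, p.1))).foldl
          (fun (d : PySem.Dict Char (List Int)) q => d.modify q.1 [] (· ++ [q.2])) PySem.Dict.empty := by
    rw [List.foldl_map]
  set sw := (PySem.List.enumerate cs).map (fun (p : Int × Char) => (p.2, p.1)) with hsw
  have hkeys : ((sw.foldl
      (fun (d : PySem.Dict Char (List Int)) q => d.modify q.1 [] (· ++ [q.2])) PySem.Dict.empty)).keys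
      = PySem.Set.ofList cs := by
    rw [PySem.Dict.keys_foldl_modify_key sw (fun (q : Char × Int) => q.1) ([] : List Int)
        (fun _ q => (· ++ [q.2])) PySem.Dict.empty]
    have hfst : sw.map (fun q => q.1) = cs := by
      rw [hsw, List.map_map]
      exact PySem.List.map_snd_enumerate cs 0
    rw [hfst]
    rfl
  have hnodup : ((sw.foldl
      (fun (d : PySem.Dict Char (List Int)) q => d.modify q.1 [] (· ++ [q.2])) PySem.Dict.empty)).keys.Nodup := by
    apply PySem.Dict.nodup_keys_foldl_modify_key sw (fun (q : Char × Int) => q.1) ([] : List Int)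
        (fun _ q => (· ++ [q.2])) PySem.Dict.empty
    simp [PySem.Dict.empty, PySem.Dict.keys]
  have hgetD : ∀ k, ((sw.foldl
      (fun (d : PySem.Dict Char (List Int)) q => d.modify q.1 [] (· ++ [q.2])) PySem.Dict.empty)).getD k []
      = pvPos cs k := by
    intro k
    rw [PySem.Dict.getD_foldl_modify_append sw PySem.Dict.empty k]
    have hen := PySem.List.enumerate_eq_map_pyRange cs ' '
    simp only [PySem.List.len_eq] at hen
    rw [hsw, hen, List.map_map, List.filter_map, List.map_map, pvPos]
    simp only [PySem.Dict.empty, PySem.Dict.getD, PySem.Dict.get?, List.find?_nil]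
    show List.map (fun (j : Int) => j)
        (List.filter (fun i => PySem.List.pyGetD cs i ' ' == k) (PySem.List.pyRange 0 (cs.length : Int) 1))
      = List.filter (fun i => PySem.List.pyGetD cs i ' ' == k) (PySem.List.pyRange 0 (cs.length : Int) 1)
    simp
  rw [hswap, PySem.Dict.items_eq_map_keys _ hnodup ([] : List Int), hkeys]
  apply List.map_congr_left
  intro k _
  rw [hgetD]

-- the joint argmax invariant: A's (mayor, pos_mayor) range scan and B's longest-list fold agree
lemma pvJoint (cs : List Char) (ks : List Char) :
    ∀ (r : Nat) (m : Nat) (pos : Int) (best : List Int),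
      m + r = ks.length → 0 ≤ pos → pos < (ks.length : Int) →
      best = pvPos cs (PySem.List.pyGetD ks pos ' ') →
      (let a := (PySem.List.pyRange (m : Int) (ks.length : Int) 1).foldl
          (fun (s : Int × Int) i =>
            if PySem.List.pyGetD (ks.map (fun k => ((cs.count k : Nat) : Int))) i 0 > s.1
            then (PySem.List.pyGetD (ks.map (fun k => ((cs.count k : Nat) : Int))) i 0, i) else s)
          (((best.length : Nat) : Int), pos);
       let b := ((ks.drop m).map (fun k => (k, pvPos cs k))).foldl
          (fun best p => if p.2.length > best.length then p.2 else best) best;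
       b = pvPos cs (PySem.List.pyGetD ks a.2 ' ') ∧ a.1 = ((b.length : Nat) : Int)
         ∧ 0 ≤ a.2 ∧ a.2 < (ks.length : Int)) := by
  intro r
  induction r with
  | zero =>
    intro m pos best hm h0 h1 hbest
    have hmk : (ks.length : Int) ≤ (m : Int) := by exact_mod_cast Nat.le_of_eq hm.symm
    simp only [PySem.List.pyRange_one_eq_nil hmk, List.foldl_nil,
      List.drop_eq_nil_of_le (by omega : ks.length ≤ m), List.map_nil]
    exact ⟨hbest, trivial, h0, h1⟩
  | succ r ih =>
    intro m pos best hm h0 h1 hbest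
    have hmlt : m < ks.length := by omega
    have hmltI : (m : Int) < (ks.length : Int) := by exact_mod_cast hmlt
    have hdrop : ks.drop m = ks[m] :: ks.drop (m + 1) := List.drop_eq_getElem_cons hmlt
    have hrep : PySem.List.pyGetD (ks.map (fun k => ((cs.count k : Nat) : Int))) (m : Int) 0
        = ((cs.count ks[m] : Nat) : Int) := by
      rw [PySem.List.pyGetD_eq_getElem _ 0 (by positivity) (by simpa using hmltI)]
      simp
    have hksm : PySem.List.pyGetD ks (m : Int) ' ' = ks[m] := by
      rw [PySem.List.pyGetD_eq_getElem _ ' ' (by positivity) hmltI]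
      simp
    have hcast : ((m : Int) + 1) = ((m + 1 : Nat) : Int) := by push_cast; ring
    rw [PySem.List.pyRange_one_cons hmltI, List.foldl_cons, hdrop, List.map_cons, List.foldl_cons]
    simp only [hrep]
    by_cases hgt : ((cs.count ks[m] : Nat) : Int) > ((best.length : Nat) : Int)
    · have hgt' : (pvPos cs ks[m]).length > best.length := by
        rw [pvPos_length]; exact_mod_cast hgt
      rw [if_pos hgt, if_pos hgt',
        show ((cs.count ks[m] : Nat) : Int) = (((pvPos cs ks[m]).length : Nat) : Int) by
          rw [pvPos_length], hcast]
      exact ih (m + 1) (m : Int) (pvPos cs ks[m]) (by omega) (by positivity) hmltI (by rw [hksm])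
    · have hgt' : ¬ (pvPos cs ks[m]).length > best.length := by
        rw [pvPos_length]; intro h; exact hgt (by exact_mod_cast h)
      rw [if_neg hgt, if_neg hgt', hcast]
      exact ih (m + 1) pos best (by omega) h0 h1 hbest

-- the two port bodies, over the shared lowered character list
lemma pvMain (cs : List Char) (h : cs ≠ []) :
    (let pr := cs.foldl
        (fun (s : List Char × List Int) letra =>
          if letra ∈ s.1 then s
          else (s.1 ++ [letra],
                s.2 ++ [cs.foldl (fun contador otra => if letra == otra then contador + 1 else contador) (0 : Int)]))
        ([], [])
     match pr.2 with
     | [] => ([] : List Int)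
     | m0 :: _ =>
       let mp := (PySem.List.pyRange 1 (pr.2.length : Int) 1).foldl
         (fun (s : Int × Int) i =>
           if PySem.List.pyGetD pr.2 i 0 > s.1 then (PySem.List.pyGetD pr.2 i 0, i) else s)
         (m0, 0)
       let letra := PySem.List.pyGetD pr.1 mp.2 ' '
       (PySem.List.pyRange 0 (cs.length : Int) 1).foldl
         (fun posiciones i => if PySem.List.pyGetD cs i ' ' == letra then posiciones ++ [i] else posiciones)
         [])
    = (let d := (PySem.List.enumerate cs).foldl
        (fun (d : PySem.Dict Char (List Int)) p => d.modify p.2 [] (· ++ [p.1])) PySem.Dict.empty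
       match d.items with
       | [] => ([] : List Int)
       | (_, v0) :: rest =>
         rest.foldl (fun best p => if p.2.length > best.length then p.2 else best) v0) := by
  have hpr := pvPalReps cs cs []
  simp only [List.map_nil] at hpr
  have hupd : PySem.Set.update ([] : List Char) cs = PySem.Set.ofList cs :=
    (PySem.Set.ofList_eq_foldl cs).symm
  rw [hupd] at hpr
  have hitems := pvItems cs
  cases hks : PySem.Set.ofList cs with
  | nil =>
    exfalso
    rcases List.exists_mem_of_ne_nil cs h with ⟨x, hx⟩
    have : x ∈ PySem.Set.ofList cs := (PySem.Set.mem_ofList cs x).mpr hx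
    rw [hks] at this
    exact absurd this (List.not_mem_nil)
  | cons k0 kr =>
    rw [hks] at hpr hitems
    simp only [hpr, hitems, List.map_cons]
    have hlen : (k0 :: kr).length = ((k0 :: kr).map (fun k => ((cs.count k : Nat) : Int))).length := by
      simp
    have hk0 : PySem.List.pyGetD (k0 :: kr) 0 ' ' = k0 := by
      rw [PySem.List.pyGetD_eq_getElem _ ' ' le_rfl (by simp)]
      rfl
    have hjoint := pvJoint cs (k0 :: kr) kr.length 1 0 (pvPos cs k0)
      (by simp; omega) le_rfl (by simp) (by rw [hk0])
    simp only [List.drop_one, List.tail_cons, List.map_cons, List.length_cons] at hjoint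
    rcases hjoint with ⟨hb, hlen1, hpos0, hpos1⟩
    rw [show (((pvPos cs k0).length : Nat) : Int) = ((cs.count k0 : Nat) : Int) by rw [pvPos_length]] at hb
    rw [show ((1 : Nat) : Int) = (1 : Int) by norm_num] at hb
    rw [PySem.List.foldl_append_if (fun i => PySem.List.pyGetD cs i ' ' == _) (fun i => i)]
    simp only [List.map_id', List.nil_append, List.length_cons, List.length_map]
    rw [hb, pvPos]


-- ===== VERDICT (by name: the statement is the Claim_ definition above) =====
theorem repetida_spec : Claim_equal_repetida := by
  intro c _ hpre
  unfold Spec_repetida repetida repetida_alt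
  have hne : PySem.Chars.lower c.toList ≠ [] := by
    intro hn
    apply hpre
    have h2 : c.toList = [] := by simpa [PySem.Chars.lower] using hn
    have := congrArg String.ofList h2
    simpa using this
  exact pvMain (PySem.Chars.lower c.toList) hne
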